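-- pv_equiv track=rewrite | github.com/cms02snu/Algorithm | baekjoon/5430.py | func
-- ===== SOURCE A (Python) =====
-- def func(f):
--     nr = 0
--     nd0 = 0
--     nd1 = 0
--
--     for g in f:
--         if g=='R':
--             nr += 1
--         else:
--             if nr%2==0:
--                 nd0 += 1
--             else:
--                 nd1 += 1
--
--     return nr,nd0,nd1
-- ===== SOURCE B (Python) =====
-- def func(f):
--     sizes = []
--     cur = 0
--     for g in f:
--         if g == 'R':
--             sizes.append(cur)
--             cur = 0
--         else:
--             cur += 1
--     sizes.append(cur)
--     return len(sizes) - 1, sum(sizes[0::2]), sum(sizes[1::2])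
-- ===== Notes on version B (the rewrite author's own statement) =====
-- stated objective: alternative
-- what changed: Instead of accumulating three counters with a running R-parity test on every character, B builds the list of segment lengths between 'R's in one pass and then combines the table: nr = len(sizes)-1, nd0/nd1 = sums of the even-/odd-indexed segment lengths.
import Mathlib
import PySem

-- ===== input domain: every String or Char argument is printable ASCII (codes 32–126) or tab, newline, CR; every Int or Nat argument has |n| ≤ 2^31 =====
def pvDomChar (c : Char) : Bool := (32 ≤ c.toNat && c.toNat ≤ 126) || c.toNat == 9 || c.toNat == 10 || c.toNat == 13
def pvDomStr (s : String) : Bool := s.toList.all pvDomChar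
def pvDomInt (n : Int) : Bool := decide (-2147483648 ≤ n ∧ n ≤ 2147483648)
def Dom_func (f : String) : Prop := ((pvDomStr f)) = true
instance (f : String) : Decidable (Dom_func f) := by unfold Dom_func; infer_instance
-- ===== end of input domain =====

-- B replaces A's running-parity counters by a build-then-combine strategy: one pass collects
-- the segment lengths between 'R's, then nr/nd0/nd1 are read off that table by index parity.

-- ===== PORT A =====
-- the loop over f accumulating (nr, nd0, nd1)
def func (f : String) : Int × Int × Int :=
  f.toList.foldl
    (fun (s : Int × Int × Int) g =>
      if g = 'R' then (s.1 + 1, s.2.1, s.2.2)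
      else if PySem.Int.mod s.1 2 = 0 then (s.1, s.2.1 + 1, s.2.2)
      else (s.1, s.2.1, s.2.2 + 1))
    (0, 0, 0)

-- ===== PORT B =====
-- hand port of sum(sizes[0::2]) / sum(sizes[1::2]) (step-2 slice + sum; PySem has no step slices):
-- exact on every list, summing the even- resp. odd-indexed elements.
mutual
def pvEvenSum : List Int → Int
  | [] => 0
  | x :: xs => x + pvOddSum xs
def pvOddSum : List Int → Int
  | [] => 0
  | _ :: xs => pvEvenSum xs
end

def func_alt (f : String) : Int × Int × Int :=
  let p := f.toList.foldl
    (fun (s : List Int × Int) g =>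
      if g = 'R' then (s.1 ++ [s.2], 0) else (s.1, s.2 + 1))
    ([], 0)
  let sizes := p.1 ++ [p.2]
  ((sizes.length : Int) - 1, pvEvenSum sizes, pvOddSum sizes)

-- ===== PRECONDITION & SPEC =====
def Spec_func (f : String) (out : Int × Int × Int) : Prop := out = func_alt f
instance (f : String) (out : Int × Int × Int) : Decidable (Spec_func f out) := by unfold Spec_func; infer_instance

-- ===== CLAIM (what is proved, stated in full; the proofs are below) =====
def Claim_equal_func : Prop := ∀ (f : String), Dom_func f → Spec_func f (func f)

-- ===== LEMMAS AND PROOFS =====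

theorem pvSum_append (xs : List Int) (y : Int) :
    pvEvenSum (xs ++ [y]) = pvEvenSum xs + (if xs.length % 2 = 0 then y else 0) ∧
    pvOddSum (xs ++ [y]) = pvOddSum xs + (if xs.length % 2 = 0 then 0 else y) := by
  induction xs with
  | nil => simp [pvEvenSum, pvOddSum]
  | cons x xs ih =>
    simp only [List.cons_append, pvEvenSum, pvOddSum, List.length_cons]
    rcases Nat.even_or_odd xs.length with h | h
    · have h2 : xs.length % 2 = 0 := Nat.even_iff.mp h
      have h3 : (xs.length + 1) % 2 = 1 := by omega
      simp [h2, h3, ih.1, ih.2]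
    · have h2 : xs.length % 2 = 1 := Nat.odd_iff.mp h
      have h3 : (xs.length + 1) % 2 = 0 := by omega
      simp only [h2, h3] at *
      simp [ih.1, ih.2]; ring

theorem pvMod_two_cast (n : Nat) : PySem.Int.mod (n : Int) 2 = ((n % 2 : Nat) : Int) :=
  PySem.Int.mod_natCast n 2

theorem pvKey (l : List Char) : ∀ (acc : List Int) (cur : Int),
    l.foldl
      (fun (s : Int × Int × Int) g =>
        if g = 'R' then (s.1 + 1, s.2.1, s.2.2)
        else if PySem.Int.mod s.1 2 = 0 then (s.1, s.2.1 + 1, s.2.2)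
        else (s.1, s.2.1, s.2.2 + 1))
      ((acc.length : Int), pvEvenSum (acc ++ [cur]), pvOddSum (acc ++ [cur])) =
    (let p := l.foldl
        (fun (s : List Int × Int) g =>
          if g = 'R' then (s.1 ++ [s.2], 0) else (s.1, s.2 + 1))
        (acc, cur)
     ((p.1.length : Int), pvEvenSum (p.1 ++ [p.2]), pvOddSum (p.1 ++ [p.2]))) := by
  induction l with
  | nil => intro acc cur; simp
  | cons g l ih =>
    intro acc cur
    by_cases hg : g = 'R'
    · simp only [List.foldl_cons, hg]
      have h0 := pvSum_append (acc ++ [cur]) 0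
      have hlen : ((acc ++ [cur]).length : Int) = (acc.length : Int) + 1 := by
        simp
      rw [show ((acc.length : Int) + 1, pvEvenSum (acc ++ [cur]), pvOddSum (acc ++ [cur]))
            = (((acc ++ [cur]).length : Int), pvEvenSum ((acc ++ [cur]) ++ [(0:Int)]),
               pvOddSum ((acc ++ [cur]) ++ [(0:Int)])) by
            rw [h0.1, h0.2, hlen]; split_ifs <;> simp]
      exact ih (acc ++ [cur]) 0
    · simp only [List.foldl_cons, hg]
      have hmod := pvMod_two_cast acc.length
      have he := pvSum_append acc (cur + 1)
      have he' := pvSum_append acc cur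
      rcases Nat.even_or_odd acc.length with h | h
      · have h2 : acc.length % 2 = 0 := Nat.even_iff.mp h
        have hcond : PySem.Int.mod (acc.length : Int) 2 = 0 := by rw [hmod, h2]; rfl
        rw [if_pos hcond]
        rw [show ((acc.length : Int), pvEvenSum (acc ++ [cur]) + 1, pvOddSum (acc ++ [cur]))
              = ((acc.length : Int), pvEvenSum (acc ++ [cur + 1]), pvOddSum (acc ++ [cur + 1])) by
              rw [he.1, he.2, he'.1, he'.2, h2]; simp; ring]
        exact ih acc (cur + 1)
      · have h2 : acc.length % 2 = 1 := Nat.odd_iff.mp h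
        have hcond : ¬ PySem.Int.mod (acc.length : Int) 2 = 0 := by rw [hmod, h2]; decide
        rw [if_neg hcond]
        rw [show ((acc.length : Int), pvEvenSum (acc ++ [cur]), pvOddSum (acc ++ [cur]) + 1)
              = ((acc.length : Int), pvEvenSum (acc ++ [cur + 1]), pvOddSum (acc ++ [cur + 1])) by
              rw [he.1, he.2, he'.1, he'.2, h2]; simp; ring]
        exact ih acc (cur + 1)

-- ===== VERDICT (by name: the statement is the Claim_ definition above) =====
theorem func_spec : Claim_equal_func := by
  intro f _
  unfold Spec_func func func_alt
  have h := pvKey f.toList [] 0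
  simp only [pvEvenSum, pvOddSum, List.nil_append, List.length_nil, Int.natCast_zero,
    add_zero] at h
  rw [h]
  simp
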